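-- pv_equiv track=rewrite | github.com/zgrate/Polwita | app.py | parse_required_fields
-- ===== SOURCE A (Python) =====
-- def parse_required_fields(json, fields):
--     if json is None:
--         return None
--     parsed = {}
--     for f in fields:
--         if f not in json:
--             return None
--         else:
--             parsed[f] = json[f]
--     return parsed
-- ===== SOURCE B (Python) =====
-- def parse_required_fields(json, fields):
--     if json is None:
--         return None
--     return _collect(json, fields)
--
--
-- def _collect(json, fields):
--     """Divide and conquer: parse each half of the field list, merge the halves."""
--     n = len(fields)
--     if n == 0:
--         return {}
--     if n == 1:
--         f = fields[0]
--         if f not in json: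
--             return None
--         return {f: json[f]}
--     mid = n // 2
--     left = _collect(json, fields[:mid])
--     if left is None:
--         return None
--     right = _collect(json, fields[mid:])
--     if right is None:
--         return None
--     return {**left, **right}
-- ===== Notes on version B (the rewrite author's own statement) =====
-- stated objective: alternative
-- what changed: Replaces A's single left-to-right loop that interleaves checking and dict building with a divide-and-conquer recursion: split the field list in half, recursively parse each half, and merge the two half-dicts with dict unpacking.
import Mathlib
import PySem

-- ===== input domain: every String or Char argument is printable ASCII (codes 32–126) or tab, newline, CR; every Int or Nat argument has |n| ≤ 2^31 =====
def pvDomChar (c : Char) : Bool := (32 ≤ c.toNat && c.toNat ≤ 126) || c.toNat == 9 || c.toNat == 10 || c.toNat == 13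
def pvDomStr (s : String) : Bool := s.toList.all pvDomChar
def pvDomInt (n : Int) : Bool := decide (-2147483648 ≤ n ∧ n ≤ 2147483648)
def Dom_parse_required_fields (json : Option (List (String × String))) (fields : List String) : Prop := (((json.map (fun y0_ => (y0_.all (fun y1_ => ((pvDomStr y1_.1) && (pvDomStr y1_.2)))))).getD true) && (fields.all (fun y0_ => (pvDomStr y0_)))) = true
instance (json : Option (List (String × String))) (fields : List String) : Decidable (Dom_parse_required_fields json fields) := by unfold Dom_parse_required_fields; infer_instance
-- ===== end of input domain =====

-- B replaces A's single left-to-right check-and-insert loop with a divide-and-conquer recursion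
-- (split the field list in half, parse each half, merge the half-dicts); alternative, not faster.

-- ===== PORT A =====
-- A's loop: for each field, fail on a missing one, else insert it into the accumulating dict
def pvGoA (js : List (String × String)) : List String → PySem.Dict String String → Option (List (String × String))
  | [], parsed => some parsed.items
  | f :: rest, parsed =>
    match js.lookup f with
    | none => none
    | some v => pvGoA js rest (parsed.insert f v)

def parse_required_fields (json : Option (List (String × String))) (fields : List String) : Option (List (String × String)) :=
  match json with
  | none => none
  | some js => pvGoA js fields PySem.Dict.empty

-- ===== PORT B =====
-- the midpoint slice bounds as take/drop (used by the port's termination proof)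
theorem pv_slice_take (fs : List String) :
    PySem.List.slice fs none (some (PySem.Int.floordiv (fs.length : Int) 2)) = fs.take (fs.length / 2) := by
  rw [show PySem.Int.floordiv ((fs.length : Nat) : Int) 2 = ((fs.length / 2 : Nat) : Int) from by
    exact_mod_cast PySem.Int.floordiv_natCast fs.length 2, PySem.List.slice_to_natCast]

theorem pv_slice_drop (fs : List String) :
    PySem.List.slice fs (some (PySem.Int.floordiv (fs.length : Int) 2)) none = fs.drop (fs.length / 2) := by
  rw [show PySem.Int.floordiv ((fs.length : Nat) : Int) 2 = ((fs.length / 2 : Nat) : Int) from by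
    exact_mod_cast PySem.Int.floordiv_natCast fs.length 2, PySem.List.slice_from_natCast]

-- _collect: divide and conquer over the field list; {**left, **right} is left updated by right's items
def pvCollectB (js : List (String × String)) (fields : List String) : Option (PySem.Dict String String) :=
  if _h0 : fields.length = 0 then some PySem.Dict.empty
  else if _h1 : fields.length = 1 then
    let f := PySem.List.pyGetD fields 0 ""
    match js.lookup f with
    | none => none
    | some v => some (PySem.Dict.empty.insert f v)
  else
    let mid : Int := PySem.Int.floordiv (fields.length : Int) 2
    match pvCollectB js (PySem.List.slice fields none (some mid)) with
    | none => none
    | some left =>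
      match pvCollectB js (PySem.List.slice fields (some mid) none) with
      | none => none
      | some right => some (right.items.foldl (fun d p => d.insert p.1 p.2) left)
termination_by fields.length
decreasing_by
  · simp only [pv_slice_take, List.length_take]
    omega
  · simp only [pv_slice_drop, List.length_drop]
    omega

def parse_required_fields_alt (json : Option (List (String × String))) (fields : List String) : Option (List (String × String)) :=
  match json with
  | none => none
  | some js => (pvCollectB js fields).map (fun d => d.items)

-- ===== PRECONDITION & SPEC =====
def Spec_parse_required_fields (json : Option (List (String × String))) (fields : List String) (out : Option (List (String × String))) : Prop := out = parse_required_fields_alt json fields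
instance (json : Option (List (String × String))) (fields : List String) (out : Option (List (String × String))) : Decidable (Spec_parse_required_fields json fields out) := by unfold Spec_parse_required_fields; infer_instance

-- ===== CLAIM (what is proved, stated in full; the proofs are below) =====
def Claim_equal_parse_required_fields : Prop := ∀ (json : Option (List (String × String))) (fields : List String), Dom_parse_required_fields json fields → Spec_parse_required_fields json fields (parse_required_fields json fields)

-- ===== LEMMAS AND PROOFS =====

-- canonical form both ports reduce to: the dict built by inserting each field left to right
def pvDL (js : List (String × String)) (d : PySem.Dict String String) (gs : List String) : PySem.Dict String String :=
  gs.foldl (fun e g => e.insert g ((js.lookup g).getD "")) d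

theorem get?_pvDL (js : List (String × String)) (gs : List String) :
    ∀ (d : PySem.Dict String String) (k : String),
      (pvDL js d gs).get? k = if k ∈ gs then some ((js.lookup k).getD "") else d.get? k := by
  induction gs with
  | nil => intro d k; simp [pvDL]
  | cons g rest ih =>
    intro d k
    simp only [pvDL, List.foldl_cons] at *
    rw [ih]
    by_cases hk : k ∈ rest
    · simp [hk]
    · by_cases hg : k = g
      · subst hg; simp [hk, PySem.Dict.get?_insert_self]
      · simp [hk, hg, PySem.Dict.get?_insert_of_ne _ _ hg]

theorem nodup_keys_pvDL (js : List (String × String)) (d : PySem.Dict String String)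
    (gs : List String) (hd : d.keys.Nodup) : (pvDL js d gs).keys.Nodup :=
  PySem.Dict.nodup_keys_foldl_insert gs _ d hd

-- inserting a key with the value it already has is a no-op
theorem insert_get?_self (d : PySem.Dict String String) (k : String) (v : String)
    (hnd : d.keys.Nodup) (h : d.get? k = some v) : d.insert k v = d := by
  apply PySem.Dict.ext
  have hc : d.contains k := by
    rw [PySem.Dict.contains_eq_isSome_get?, h]; rfl
  rw [PySem.Dict.items_insert_of_contains d v hc]
  have hid : ∀ p ∈ d.items, (if p.1 == k then (k, v) else p) = p := by
    intro p hp
    obtain ⟨p1, p2⟩ := p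
    by_cases hpk : p1 = k
    · have hv := PySem.Dict.get?_of_mem_items d hp hnd
      simp only at hv
      rw [hpk, h] at hv
      simp [hpk, Option.some_inj.mp hv]
    · simp [hpk]
  rw [List.map_congr_left hid]
  simp

theorem pvDL_ofList (js : List (String × String)) (gs : List String) :
    ∀ (d : PySem.Dict String String), d.keys.Nodup →
      pvDL js d (PySem.Set.ofList gs) = pvDL js d gs := by
  induction gs using List.reverseRecOn with
  | nil => intro d _; rfl
  | append_singleton gs x ih =>
    intro d hd
    rw [PySem.Set.ofList_append_singleton, PySem.Set.add_eq_ite]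
    by_cases hx : x ∈ PySem.Set.ofList gs
    · rw [if_pos hx]
      have hmem : x ∈ gs := (PySem.Set.mem_ofList _ _).mp hx
      have hstep : pvDL js d (gs ++ [x]) = (pvDL js d gs).insert x ((js.lookup x).getD "") := by
        simp [pvDL, List.foldl_append]
      have h1 : pvDL js d (gs ++ [x]) = pvDL js d gs := by
        rw [hstep]
        exact insert_get?_self _ _ _ (nodup_keys_pvDL js d gs hd)
          (by rw [get?_pvDL, if_pos hmem])
      rw [ih d hd, h1]
    · rw [if_neg hx]
      have hstep : pvDL js d (PySem.Set.ofList gs ++ [x])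
          = (pvDL js d (PySem.Set.ofList gs)).insert x ((js.lookup x).getD "") := by
        simp [pvDL, List.foldl_append]
      have hstep' : pvDL js d (gs ++ [x]) = (pvDL js d gs).insert x ((js.lookup x).getD "") := by
        simp [pvDL, List.foldl_append]
      rw [hstep, hstep', ih d hd]

-- merging the dict built from gs into d equals inserting gs into d directly
theorem merge_pvDL (js : List (String × String)) (gs : List String)
    (d : PySem.Dict String String) (hd : d.keys.Nodup) :
    (pvDL js PySem.Dict.empty gs).items.foldl (fun e p => e.insert p.1 p.2) d = pvDL js d gs := by
  have hnd : (pvDL js PySem.Dict.empty gs).keys.Nodup :=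
    nodup_keys_pvDL js _ gs PySem.Dict.nodup_keys_empty
  rw [PySem.Dict.items_eq_map_keys _ hnd ""]
  have hkeys : (pvDL js PySem.Dict.empty gs).keys = PySem.Set.ofList gs := by
    simp only [pvDL]
    rw [PySem.Dict.keys_foldl_insert]
    simp [PySem.Dict.keys_empty, PySem.Set.update_nil_left]
  rw [hkeys]
  have hfun : ∀ k ∈ PySem.Set.ofList gs,
      (fun k => (k, (pvDL js PySem.Dict.empty gs).getD k "")) k
        = (fun k => (k, (js.lookup k).getD "")) k := by
    intro k hk
    have hm : k ∈ gs := (PySem.Set.mem_ofList _ _).mp hk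
    simp only [PySem.Dict.getD_eq_get?_getD, get?_pvDL, hm, if_pos, Option.getD_some]
  rw [List.map_congr_left hfun, List.foldl_map]
  exact pvDL_ofList js gs d hd

-- A's loop in canonical form
theorem pvGoA_eq (js : List (String × String)) (fs : List String) :
    ∀ parsed : PySem.Dict String String,
      pvGoA js fs parsed =
        if fs.all (fun f => (js.lookup f).isSome) then some (pvDL js parsed fs).items else none := by
  induction fs with
  | nil => intro parsed; simp [pvGoA, pvDL]
  | cons f rest ih =>
    intro parsed
    cases h : js.lookup f with
    | none => simp [pvGoA, h]
    | some v =>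
      simp only [pvGoA, h, ih, List.all_cons, Option.isSome_some, Bool.true_and, pvDL,
        List.foldl_cons, Option.getD_some]

-- B's divide and conquer in the same canonical form
theorem pvCollectB_eq (js : List (String × String)) :
    ∀ (n : Nat) (fs : List String), fs.length ≤ n →
      pvCollectB js fs =
        if fs.all (fun f => (js.lookup f).isSome) then some (pvDL js PySem.Dict.empty fs) else none := by
  intro n
  induction n with
  | zero =>
    intro fs hfs
    have : fs = [] := List.length_eq_zero_iff.mp (Nat.le_zero.mp hfs)
    subst this
    simp [pvCollectB, pvDL]
  | succ n ih =>
    intro fs hfs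
    by_cases h0 : fs.length = 0
    · have : fs = [] := List.length_eq_zero_iff.mp h0
      subst this
      simp [pvCollectB, pvDL]
    · by_cases h1 : fs.length = 1
      · obtain ⟨f, hf⟩ := List.length_eq_one_iff.mp h1
        subst hf
        rw [pvCollectB]
        simp only [List.length_cons, List.length_nil]
        cases h : js.lookup f with
        | none => simp [PySem.List.pyGetD_zero_cons, h]
        | some v => simp [PySem.List.pyGetD_zero_cons, h, pvDL]
      · rw [pvCollectB]
        rw [dif_neg h0, dif_neg h1]
        simp only [pv_slice_take, pv_slice_drop]
        have hlt : fs.length / 2 ≥ 1 ∧ fs.length / 2 < fs.length := by omega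
        have hta : (fs.take (fs.length / 2)).length ≤ n := by
          simp [List.length_take]; omega
        have hdr : (fs.drop (fs.length / 2)).length ≤ n := by
          simp [List.length_drop]; omega
        rw [ih _ hta, ih _ hdr]
        have hsplit : fs.take (fs.length / 2) ++ fs.drop (fs.length / 2) = fs :=
          List.take_append_drop _ fs
        by_cases hL : (fs.take (fs.length / 2)).all (fun f => (js.lookup f).isSome) = true
        · by_cases hR : (fs.drop (fs.length / 2)).all (fun f => (js.lookup f).isSome) = true
          · have hall : fs.all (fun f => (js.lookup f).isSome) = true := by
              rw [← hsplit, List.all_append, hL, hR]; rfl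
            rw [if_pos hL, if_pos hR, if_pos hall]
            show some ((pvDL js PySem.Dict.empty (fs.drop (fs.length / 2))).items.foldl
              (fun d p => d.insert p.1 p.2) (pvDL js PySem.Dict.empty (fs.take (fs.length / 2)))) = _
            rw [merge_pvDL js _ _ (nodup_keys_pvDL js _ _ PySem.Dict.nodup_keys_empty)]
            simp only [pvDL]
            rw [← List.foldl_append, hsplit]
          · have hall : ¬ fs.all (fun f => (js.lookup f).isSome) = true := by
              rw [← hsplit, List.all_append, hL]
              simpa using hR
            rw [if_pos hL, if_neg hR, if_neg hall]
        · have hall : ¬ fs.all (fun f => (js.lookup f).isSome) = true := by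
            rw [← hsplit, List.all_append]
            simp [hL]
          rw [if_neg hL, if_neg hall]

-- ===== VERDICT (by name: the statement is the Claim_ definition above) =====
theorem parse_required_fields_spec : Claim_equal_parse_required_fields := by
  intro json fields _
  unfold Spec_parse_required_fields parse_required_fields parse_required_fields_alt
  cases json with
  | none => rfl
  | some js =>
    simp only []
    rw [pvGoA_eq, pvCollectB_eq js fields.length fields le_rfl]
    by_cases h : fields.all (fun f => (js.lookup f).isSome) <;> simp [h]
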